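-- pv_equiv track=rewrite | github.com/izzatbekulkanov/Library | app/api/endpoints/books.py | _format_inventory_ranges
-- ===== SOURCE A (Python) =====
-- def _format_inventory_ranges(invs: list[str]) -> str:
--     if not invs:
--         return ""
--     prefixes = {inv.rsplit("/", 1)[0] for inv in invs if "/" in inv}
--     if len(prefixes) != 1:
--         return ", ".join(sorted(invs))
--     prefix = list(prefixes)[0] + "/" if prefixes else ""
--     try:
--         numbers = sorted([int(inv.rsplit("/", 1)[1]) for inv in invs if "/" in inv])
--     except ValueError:
--         return ", ".join(sorted(invs))
--     if not numbers:
--         return ""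
--     ranges: list[str] = []
--     start = current = numbers[0]
--     for num in numbers[1:]:
--         if num == current + 1:
--             current = num
--         else:
--             ranges.append(str(start) if start == current else f"{start}-{current}")
--             start = current = num
--     ranges.append(str(start) if start == current else f"{start}-{current}")
--     return prefix + ", ".join(ranges)
-- ===== SOURCE B (Python) =====
-- def _format_inventory_ranges(invs: list[str]) -> str:
--     if not invs:
--         return ""
--     prefixes = {inv.rsplit("/", 1)[0] for inv in invs if "/" in inv}
--     if len(prefixes) != 1:
--         return ", ".join(sorted(invs))
--     try:
--         numbers = sorted(int(inv.rsplit("/", 1)[1]) for inv in invs if "/" in inv)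
--     except ValueError:
--         return ", ".join(sorted(invs))
--
--     def split_run(first, rest):
--         # peel the maximal leading consecutive run; return (last, remainder)
--         last = first
--         while rest and rest[0] == last + 1:
--             last = rest[0]
--             rest = rest[1:]
--         return last, rest
--
--     pieces = []
--     rest = numbers
--     while rest:
--         last, rest2 = split_run(rest[0], rest[1:])
--         pieces.append(str(rest[0]) if rest[0] == last else f"{rest[0]}-{last}")
--         rest = rest2
--     return list(prefixes)[0] + "/" + ", ".join(pieces)
-- ===== Notes on version B (the rewrite author's own statement) =====
-- stated objective: alternative
-- what changed: The start/current accumulator state machine over numbers[1:] is replaced by repeatedly peeling the maximal leading consecutive run off the sorted list and formatting each run; the surrounding guards (empty input, prefix-set check, int-parse fallback) keep their behaviour, and the dead 'if not numbers' guard is dropped since a unique prefix implies at least one number.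
import Mathlib
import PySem

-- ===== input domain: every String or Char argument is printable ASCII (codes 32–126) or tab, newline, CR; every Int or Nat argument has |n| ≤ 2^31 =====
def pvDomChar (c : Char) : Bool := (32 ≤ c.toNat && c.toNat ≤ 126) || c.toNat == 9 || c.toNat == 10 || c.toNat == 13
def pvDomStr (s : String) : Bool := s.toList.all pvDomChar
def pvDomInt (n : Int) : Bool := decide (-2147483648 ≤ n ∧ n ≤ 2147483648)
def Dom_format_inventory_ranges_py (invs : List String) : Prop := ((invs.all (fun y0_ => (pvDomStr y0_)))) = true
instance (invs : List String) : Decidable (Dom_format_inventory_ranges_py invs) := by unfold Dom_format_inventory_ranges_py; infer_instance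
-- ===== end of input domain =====

-- B replaces A's start/current accumulator loop by peeling maximal consecutive runs
-- off the sorted number list (objective: alternative decomposition, same cost).

-- ===== PORT A =====
-- shared port of the builtin inv.rsplit("/", 1): (before last '/', after last '/');
-- exact whenever '/' occurs in the string (both Pythons only call it under that filter)
def rsplitSlash : List Char → List Char × List Char
  | [] => ([], [])
  | c :: t =>
      if c = '/' ∧ '/' ∉ t then ([], t)
      else (c :: (rsplitSlash t).1, (rsplitSlash t).2)

-- str(start) if start == current else f"{start}-{current}"  (shared formatting expression)
def fmtRange (s c : Int) : List Char :=
  if s = c then PySem.Int.toChars s else PySem.Int.toChars s ++ '-' :: PySem.Int.toChars c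

-- the body of A's for-loop, state (ranges, start, current)
def stepA (st : List (List Char) × Int × Int) (num : Int) : List (List Char) × Int × Int :=
  if num = st.2.2 + 1 then (st.1, st.2.1, num)
  else (st.1 ++ [fmtRange st.2.1 st.2.2], num, num)

def format_inventory_ranges_py (invs : List String) : String :=
  if invs = [] then ""
  else
    let withSlash := invs.filter (fun inv => inv.toList.contains '/')
    let prefixes : PySem.Set (List Char) :=
      PySem.Set.ofList (withSlash.map (fun inv => (rsplitSlash inv.toList).1))
    if prefixes.length ≠ 1 then PySem.Str.join ", " (PySem.List.sorted invs (fun x => x) false)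
    else
      let pfx : List Char := if prefixes = [] then [] else prefixes.headD [] ++ ['/']
      let parsed := withSlash.map (fun inv => PySem.Int.ofChars? (rsplitSlash inv.toList).2)
      if parsed.contains none then PySem.Str.join ", " (PySem.List.sorted invs (fun x => x) false)
      else
        let numbers := PySem.List.sorted (parsed.filterMap (fun x => x)) (fun x => x) false
        match numbers with
        | [] => ""
        | n0 :: rest =>
          let fin := rest.foldl stepA ([], n0, n0)
          String.ofList (pfx ++ PySem.Chars.join (", ".toList) (fin.1 ++ [fmtRange fin.2.1 fin.2.2]))

-- ===== PORT B =====
-- split_run: peel the maximal leading consecutive run, returning (last, remainder)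
def splitRun : Int → List Int → Int × List Int
  | last, [] => (last, [])
  | last, n :: t => if n = last + 1 then splitRun n t else (last, n :: t)

-- needed by piecesOf for termination
theorem splitRun_snd_length : ∀ (t : List Int) (l : Int), (splitRun l t).2.length ≤ t.length := by
  intro t
  induction t with
  | nil => intro l; simp [splitRun]
  | cons n t ih =>
      intro l
      simp only [splitRun]
      split
      · exact Nat.le_trans (ih n) (Nat.le_succ _)
      · simp

-- B's outer while loop: format each peeled run
def piecesOf : List Int → List (List Char)
  | [] => []
  | n :: t =>
      fmtRange n (splitRun n t).1 :: piecesOf (splitRun n t).2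
termination_by l => l.length
decreasing_by
  simpa using Nat.lt_succ_of_le (splitRun_snd_length t n)

def format_inventory_ranges_py_alt (invs : List String) : String :=
  if invs = [] then ""
  else
    let withSlash := invs.filter (fun inv => inv.toList.contains '/')
    let prefixes : PySem.Set (List Char) :=
      PySem.Set.ofList (withSlash.map (fun inv => (rsplitSlash inv.toList).1))
    if prefixes.length ≠ 1 then PySem.Str.join ", " (PySem.List.sorted invs (fun x => x) false)
    else
      let parsed := withSlash.map (fun inv => PySem.Int.ofChars? (rsplitSlash inv.toList).2)
      if parsed.contains none then PySem.Str.join ", " (PySem.List.sorted invs (fun x => x) false)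
      else
        let numbers := PySem.List.sorted (parsed.filterMap (fun x => x)) (fun x => x) false
        String.ofList ((prefixes.headD [] ++ ['/']) ++
          PySem.Chars.join (", ".toList) (piecesOf numbers))

-- ===== PRECONDITION & SPEC =====
def Spec_format_inventory_ranges_py (invs : List String) (out : String) : Prop := out = format_inventory_ranges_py_alt invs
instance (invs : List String) (out : String) : Decidable (Spec_format_inventory_ranges_py invs out) := by unfold Spec_format_inventory_ranges_py; infer_instance

-- ===== CLAIM (what is proved, stated in full; the proofs are below) =====
def Claim_equal_format_inventory_ranges_py : Prop := ∀ (invs : List String), Dom_format_inventory_ranges_py invs → Spec_format_inventory_ranges_py invs (format_inventory_ranges_py invs)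

-- ===== LEMMAS AND PROOFS =====

-- A's loop over the tail, flushed, produces exactly B's run pieces
theorem loop_eq_pieces : ∀ (t : List Int) (ranges : List (List Char)) (s c : Int),
    (t.foldl stepA (ranges, s, c)).1
      ++ [fmtRange (t.foldl stepA (ranges, s, c)).2.1 (t.foldl stepA (ranges, s, c)).2.2]
    = ranges ++ fmtRange s (splitRun c t).1 :: piecesOf (splitRun c t).2 := by
  intro t
  induction t with
  | nil => intro ranges s c; simp [splitRun, piecesOf]
  | cons n t ih =>
      intro ranges s c
      by_cases h : n = c + 1
      · subst h
        simp only [List.foldl, stepA, splitRun, if_pos trivial]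
        exact ih ranges s (c + 1)
      · simp only [List.foldl, stepA, splitRun, if_neg h]
        rw [ih (ranges ++ [fmtRange s c]) n n]
        simp [piecesOf]

theorem filterMap_id_length_of_no_none {α : Type} (l : List (Option α))
    (h : none ∉ l) : (l.filterMap (fun x => x)).length = l.length := by
  induction l with
  | nil => rfl
  | cons x t ih =>
      cases x with
      | none => simp at h
      | some a =>
          simp only [List.mem_cons, not_or] at h
          simp [ih h.2]

-- ===== VERDICT (by name: the statement is the Claim_ definition above) =====
theorem format_inventory_ranges_py_spec : Claim_equal_format_inventory_ranges_py := by
  intro invs _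
  unfold Spec_format_inventory_ranges_py format_inventory_ranges_py format_inventory_ranges_py_alt
  by_cases hnil : invs = []
  · simp [hnil]
  · simp only [if_neg hnil]
    set withSlash := invs.filter (fun inv => inv.toList.contains '/') with hws
    set prefixes : PySem.Set (List Char) :=
      PySem.Set.ofList (withSlash.map (fun inv => (rsplitSlash inv.toList).1)) with hpf
    by_cases hlen : prefixes.length ≠ 1
    · simp [hlen]
    · simp only [if_neg hlen]
      rw [not_not] at hlen
      have hpfne : prefixes ≠ [] := by
        intro h; rw [h] at hlen; simp at hlen
      set parsed := withSlash.map (fun inv => PySem.Int.ofChars? (rsplitSlash inv.toList).2) with hpr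
      by_cases hnone : none ∈ parsed
      · simp [hnone]
      · simp only [List.contains_eq_mem, decide_eq_true_eq, if_neg hnone]
        -- numbers is nonempty: prefixes nonempty forces withSlash nonempty, hence parsed nonempty
        have hwsne : withSlash ≠ [] := by
          intro h
          apply hpfne
          rw [hpf, h]; rfl
        have hparsedne : parsed ≠ [] := by
          rw [hpr]; simpa using hwsne
        have hfmne : parsed.filterMap (fun x => x) ≠ [] := by
          intro h
          have := filterMap_id_length_of_no_none parsed hnone
          rw [h] at this
          exact hparsedne (List.length_eq_zero_iff.mp this.symm)
        have hnumne : PySem.List.sorted (parsed.filterMap (fun x => x)) (fun x => x) false ≠ [] := by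
          simpa [PySem.List.sorted_eq_nil_iff] using hfmne
        cases hnum : PySem.List.sorted (parsed.filterMap (fun x => x)) (fun x => x) false with
        | nil => exact absurd hnum hnumne
        | cons n0 rest =>
            simp only [if_neg hpfne]
            rw [loop_eq_pieces rest [] n0 n0]
            simp [piecesOf]
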